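-- pv_equiv track=rewrite | github.com/hanseungwook/memory | src/memgen/memory/prompts.py | _group_prompt_solutions
-- ===== SOURCE A (Python) =====
-- _MAX_SOLUTIONS_PER_TIER = None  # Use all solutions
--
-- _PROMPT_TIER_LABELS = {
--     "correct": "Correct",
--     "full": "Correct",
--     "partial": "Partially Correct",
--     "incorrect": "Incorrect",
--     "fail": "Incorrect",
-- }
--
-- _PROMPT_TIER_ORDER = ("Correct", "Partially Correct", "Incorrect")
--
-- def _group_prompt_solutions(
--     grouped_solutions: dict[str, list[str]]
-- ) -> dict[str, list[str]]:
--     merged: dict[str, list[str]] = {}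
--
--     for tier, solutions in grouped_solutions.items():
--         if not solutions:
--             continue
--         display_label = _PROMPT_TIER_LABELS.get(tier, tier.replace("_", " ").title())
--         tier_solutions = (
--             solutions
--             if _MAX_SOLUTIONS_PER_TIER is None
--             else solutions[:_MAX_SOLUTIONS_PER_TIER]
--         )
--         merged.setdefault(display_label, []).extend(tier_solutions)
--
--     ordered: dict[str, list[str]] = {}
--     for label in _PROMPT_TIER_ORDER:
--         if label in merged:
--             ordered[label] = merged.pop(label)
--     for label, solutions in merged.items():
--         ordered[label] = solutions
--
--     return ordered
-- ===== SOURCE B (Python) =====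
-- _MAX_SOLUTIONS_PER_TIER = None  # Use all solutions
--
-- _PROMPT_TIER_LABELS = {
--     "correct": "Correct",
--     "full": "Correct",
--     "partial": "Partially Correct",
--     "incorrect": "Incorrect",
--     "fail": "Incorrect",
-- }
--
-- _PROMPT_TIER_ORDER = ("Correct", "Partially Correct", "Incorrect")
--
--
-- def _group_prompt_solutions(
--     grouped_solutions: dict[str, list[str]]
-- ) -> dict[str, list[str]]:
--     rank = {label: i for i, label in enumerate(_PROMPT_TIER_ORDER)}
--     merged: dict[str, list[str]] = {}
--     for tier, solutions in grouped_solutions.items():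
--         if solutions:
--             label = _PROMPT_TIER_LABELS.get(tier, tier.replace("_", " ").title())
--             merged[label] = merged.get(label, []) + solutions
--     return dict(sorted(merged.items(), key=lambda kv: rank.get(kv[0], len(rank))))
-- ===== Notes on version B (the rewrite author's own statement) =====
-- stated objective: alternative
-- what changed: The two explicit reordering loops (pop each known tier into a fresh dict, then re-append the leftover labels) are replaced by a single stable sort of the merged items keyed by tier rank (unknown labels rank last and keep first-appearance order by stability), and the grouping step accumulates by list concatenation onto the previous value instead of setdefault plus extend.
import Mathlib
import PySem

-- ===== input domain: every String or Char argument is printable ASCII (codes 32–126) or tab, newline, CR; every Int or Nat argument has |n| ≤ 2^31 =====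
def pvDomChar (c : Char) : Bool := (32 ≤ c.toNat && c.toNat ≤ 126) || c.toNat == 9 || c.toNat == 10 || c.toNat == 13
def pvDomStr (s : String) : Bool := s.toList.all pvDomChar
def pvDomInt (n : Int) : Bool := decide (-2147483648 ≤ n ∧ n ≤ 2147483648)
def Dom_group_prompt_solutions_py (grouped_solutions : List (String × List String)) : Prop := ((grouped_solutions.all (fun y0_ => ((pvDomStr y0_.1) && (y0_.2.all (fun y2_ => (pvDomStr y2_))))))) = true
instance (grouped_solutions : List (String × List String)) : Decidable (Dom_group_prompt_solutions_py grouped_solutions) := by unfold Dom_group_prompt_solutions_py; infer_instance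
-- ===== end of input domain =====

-- B replaces A's two explicit reordering loops (pop the known tiers, then re-append the
-- rest) with one stable sort of the merged items keyed by tier rank; objective: alternative.

-- ===== shared module constants and helpers (both Pythons use the same module tables) =====

-- ASCII lower/upper of one char (exact on the printable-ASCII domain)
def pvLowerChar (c : Char) : Char :=
  if 'A' ≤ c ∧ c ≤ 'Z' then Char.ofNat (c.toNat + 32) else c

def pvUpperChar (c : Char) : Char :=
  if 'a' ≤ c ∧ c ≤ 'z' then Char.ofNat (c.toNat - 32) else c

-- str.title(), hand-ported (exact on ASCII, where the cased characters are exactly the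
-- letters): a letter is uppercased iff the previous char is not a letter, else lowercased;
-- non-letters pass through.
def pvTitleChars : List Char → Bool → List Char
  | [], _ => []
  | c :: rest, prevAlpha =>
    let isA := ('a' ≤ c && c ≤ 'z') || ('A' ≤ c && c ≤ 'Z')
    (if isA then (if prevAlpha then pvLowerChar c else pvUpperChar c) else c)
      :: pvTitleChars rest isA

def pvTitle (s : String) : String := String.ofList (pvTitleChars s.toList false)

-- _PROMPT_TIER_LABELS
def promptTierLabels : PySem.Dict String String :=
  PySem.Dict.ofList
    [("correct", "Correct"), ("full", "Correct"), ("partial", "Partially Correct"),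
     ("incorrect", "Incorrect"), ("fail", "Incorrect")]

-- _PROMPT_TIER_ORDER
def promptTierOrder : List String := ["Correct", "Partially Correct", "Incorrect"]

-- _PROMPT_TIER_LABELS.get(tier, tier.replace("_", " ").title())
def promptTierLabel (tier : String) : String :=
  (promptTierLabels.get? tier).getD (pvTitle (PySem.Str.replace tier "_" " "))

-- ===== PORT A =====
def group_prompt_solutions_py (grouped_solutions : List (String × List String)) : List (String × List String) :=
  -- merged.setdefault(display_label, []).extend(tier_solutions)  ==  d[k] = d.get(k, []) + ext  ==  Dict.modify
  let merged : PySem.Dict String (List String) :=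
    grouped_solutions.foldl
      (fun m p =>
        if p.2.isEmpty then m
        else
          let display_label := promptTierLabel p.1
          let tier_solutions := p.2  -- _MAX_SOLUTIONS_PER_TIER is None, so the slice branch is dead
          m.modify display_label [] (fun cur => cur ++ tier_solutions))
      PySem.Dict.empty
  -- for label in _PROMPT_TIER_ORDER: if label in merged: ordered[label] = merged.pop(label)
  let st :=
    promptTierOrder.foldl
      (fun (s : PySem.Dict String (List String) × PySem.Dict String (List String)) label =>
        if s.2.contains label then
          match s.2.pop? label with
          | some (v, m') => (s.1.insert label v, m')
          | none => s
        else s)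
      (PySem.Dict.empty, merged)
  -- for label, solutions in merged.items(): ordered[label] = solutions
  let ordered := st.2.items.foldl (fun o (p : String × List String) => o.insert p.1 p.2) st.1
  ordered.items

-- ===== PORT B =====
def group_prompt_solutions_py_alt (grouped_solutions : List (String × List String)) : List (String × List String) :=
  -- rank = {label: i for i, label in enumerate(_PROMPT_TIER_ORDER)}
  let rank : PySem.Dict String Int :=
    PySem.Dict.ofList ((PySem.List.enumerate promptTierOrder).map (fun p => (p.2, p.1)))
  -- merged[label] = merged.get(label, []) + solutions
  let merged : PySem.Dict String (List String) :=
    grouped_solutions.foldl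
      (fun m p =>
        if p.2.isEmpty then m
        else
          let label := promptTierLabel p.1
          m.insert label (m.getD label [] ++ p.2))
      PySem.Dict.empty
  -- dict(sorted(merged.items(), key=lambda kv: rank.get(kv[0], len(rank))))
  (PySem.Dict.ofList
    (PySem.List.sorted merged.items (fun kv => rank.getD kv.1 (PySem.Dict.size rank : Int)))).items

-- ===== PRECONDITION & SPEC =====
def Spec_group_prompt_solutions_py (grouped_solutions : List (String × List String)) (out : List (String × List String)) : Prop := out = group_prompt_solutions_py_alt grouped_solutions
instance (grouped_solutions : List (String × List String)) (out : List (String × List String)) : Decidable (Spec_group_prompt_solutions_py grouped_solutions out) := by unfold Spec_group_prompt_solutions_py; infer_instance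

-- ===== CLAIM (what is proved, stated in full; the proofs are below) =====
def Claim_equal_group_prompt_solutions_py : Prop := ∀ (grouped_solutions : List (String × List String)), Dom_group_prompt_solutions_py grouped_solutions → Spec_group_prompt_solutions_py grouped_solutions (group_prompt_solutions_py grouped_solutions)

-- ===== LEMMAS AND PROOFS =====

-- the rank a label sorts by: 0,1,2 for the known tiers, 3 otherwise
def rankF (l : String) : Int :=
  if l = "Correct" then 0 else if l = "Partially Correct" then 1
  else if l = "Incorrect" then 2 else 3

theorem rankF_cases (l : String) : rankF l = 0 ∨ rankF l = 1 ∨ rankF l = 2 ∨ rankF l = 3 := by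
  unfold rankF; split_ifs <;> simp

theorem rankdict_eq :
    (PySem.Dict.ofList ((PySem.List.enumerate promptTierOrder).map (fun p => (p.2, p.1)))
      : PySem.Dict String Int)
    = PySem.Dict.mk [("Correct", 0), ("Partially Correct", 1), ("Incorrect", 2)] := by decide

theorem rank_getD (l : String) :
    (PySem.Dict.mk [("Correct", (0 : Int)), ("Partially Correct", 1), ("Incorrect", 2)]).getD l 3
      = rankF l := by
  rcases eq_or_ne l "Correct" with h | h <;> rcases eq_or_ne l "Partially Correct" with h2 | h2 <;>
    rcases eq_or_ne l "Incorrect" with h3 | h3 <;>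
    first
      | (subst h; rfl)
      | (subst h2; rfl)
      | (subst h3; rfl)
      | simp [PySem.Dict.getD, PySem.Dict.get?, rankF,
              Ne.symm h, Ne.symm h2, Ne.symm h3, h, h2, h3]

theorem rank0 (s : String) : (rankF s == 0) = (s == "Correct") := by
  unfold rankF; split_ifs <;> simp [*]
theorem rank1 (s : String) : (rankF s == 1) = (s == "Partially Correct") := by
  unfold rankF; split_ifs <;> simp [*]
theorem rank2 (s : String) : (rankF s == 2) = (s == "Incorrect") := by
  unfold rankF; split_ifs <;> simp [*]
theorem rank3 (s : String) :
    (rankF s == 3) = (!(s == "Correct") && !(s == "Partially Correct") && !(s == "Incorrect")) := by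
  unfold rankF; split_ifs <;> simp [*]

theorem key_eq_rankF :
    (fun kv : String × List String =>
      (PySem.Dict.ofList ((PySem.List.enumerate promptTierOrder).map (fun p => (p.2, p.1)))
        : PySem.Dict String Int).getD kv.1
        ((PySem.Dict.size (PySem.Dict.ofList ((PySem.List.enumerate promptTierOrder).map (fun p => (p.2, p.1))) : PySem.Dict String Int) : Nat) : Int))
    = fun kv => rankF kv.1 := by
  funext kv
  rw [rankdict_eq]
  show (PySem.Dict.mk [("Correct", (0 : Int)), ("Partially Correct", 1), ("Incorrect", 2)]).getD
        kv.1 ((3 : Nat) : Int) = _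
  norm_num
  exact rank_getD kv.1

-- ----- generic: a stable insertion sort with keys in {0,1,2,3} is the concatenation of buckets -----

theorem insertBy_cons {α : Type} (before : α → α → Bool) (x y : α) (ys : List α) :
    PySem.List.insertBy before x (y :: ys) =
      if before x y then x :: y :: ys else y :: PySem.List.insertBy before x ys := rfl

theorem insertBy_all_before {α : Type} (before : α → α → Bool) (x : α) (t : List α)
    (h : ∀ y ∈ t, before x y = true) :
    PySem.List.insertBy before x t = x :: t := by
  cases t with
  | nil => rfl
  | cons y ys => rw [insertBy_cons, h y (List.mem_cons_self)]; simp

theorem insertBy_append_not {α : Type} (before : α → α → Bool) (x : α) (l t : List α)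
    (h : ∀ y ∈ l, before x y = false) :
    PySem.List.insertBy before x (l ++ t) = l ++ PySem.List.insertBy before x t := by
  induction l with
  | nil => simp
  | cons y ys ih =>
    simp only [List.cons_append, insertBy_cons, h y List.mem_cons_self]
    simp only [Bool.false_eq_true, if_false]
    rw [ih (fun z hz => h z (List.mem_cons_of_mem _ hz))]

theorem mem_filter_key {α : Type} (key : α → Int) (xs : List α) (i : Int) (y : α)
    (hy : y ∈ xs.filter (fun x => key x == i)) : key y = i := by
  have := List.of_mem_filter hy; simpa using this

theorem sorted4 {α : Type} (key : α → Int) (xs : List α)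
    (h : ∀ x ∈ xs, key x = 0 ∨ key x = 1 ∨ key x = 2 ∨ key x = 3) :
    PySem.List.sorted xs key =
      xs.filter (fun x => key x == 0) ++ xs.filter (fun x => key x == 1)
        ++ xs.filter (fun x => key x == 2) ++ xs.filter (fun x => key x == 3) := by
  rw [PySem.List.sorted_eq_foldl_insertBy]
  induction xs using List.reverseRecOn with
  | nil => simp
  | append_singleton xs x ih =>
    have hxs : ∀ y ∈ xs, key y = 0 ∨ key y = 1 ∨ key y = 2 ∨ key y = 3 :=
      fun y hy => h y (List.mem_append_left _ hy)
    rw [List.foldl_append, List.foldl_cons, List.foldl_nil, ih hxs]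
    simp only [List.filter_append, List.filter_cons, List.filter_nil]
    set before := fun a b : α => decide (key a < key b) with hb
    have hbt : ∀ y i, key y = i → key x < i → before x y = true := by
      intro y i hyi hlt; simp [hb, hyi, hlt]
    have hbf : ∀ y i, key y = i → i ≤ key x → before x y = false := by
      intro y i hyi hle; simp [hb, hyi]; omega
    rcases h x (by simp) with hx | hx | hx | hx
    · rw [show xs.filter (fun a => key a == 0) ++ xs.filter (fun a => key a == 1)
            ++ xs.filter (fun a => key a == 2) ++ xs.filter (fun a => key a == 3)
          = xs.filter (fun a => key a == 0) ++ (xs.filter (fun a => key a == 1)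
            ++ (xs.filter (fun a => key a == 2) ++ xs.filter (fun a => key a == 3))) by
          simp [List.append_assoc]]
      rw [insertBy_append_not before x _ _
            (fun y hy => hbf y 0 (mem_filter_key key xs 0 y hy) (by omega))]
      rw [insertBy_all_before before x _ ?_]
      · simp [hx, List.append_assoc]
      · intro y hy
        rcases List.mem_append.1 hy with hy | hy
        · exact hbt y 1 (mem_filter_key key xs 1 y hy) (by omega)
        · rcases List.mem_append.1 hy with hy | hy
          · exact hbt y 2 (mem_filter_key key xs 2 y hy) (by omega)
          · exact hbt y 3 (mem_filter_key key xs 3 y hy) (by omega)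
    · rw [show xs.filter (fun a => key a == 0) ++ xs.filter (fun a => key a == 1)
            ++ xs.filter (fun a => key a == 2) ++ xs.filter (fun a => key a == 3)
          = xs.filter (fun a => key a == 0) ++ (xs.filter (fun a => key a == 1)
            ++ (xs.filter (fun a => key a == 2) ++ xs.filter (fun a => key a == 3))) by
          simp [List.append_assoc]]
      rw [insertBy_append_not before x _ _
            (fun y hy => hbf y 0 (mem_filter_key key xs 0 y hy) (by omega))]
      rw [insertBy_append_not before x _ _
            (fun y hy => hbf y 1 (mem_filter_key key xs 1 y hy) (by omega))]
      rw [insertBy_all_before before x _ ?_]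
      · simp [hx, List.append_assoc]
      · intro y hy
        rcases List.mem_append.1 hy with hy | hy
        · exact hbt y 2 (mem_filter_key key xs 2 y hy) (by omega)
        · exact hbt y 3 (mem_filter_key key xs 3 y hy) (by omega)
    · rw [show xs.filter (fun a => key a == 0) ++ xs.filter (fun a => key a == 1)
            ++ xs.filter (fun a => key a == 2) ++ xs.filter (fun a => key a == 3)
          = (xs.filter (fun a => key a == 0) ++ xs.filter (fun a => key a == 1)
            ++ xs.filter (fun a => key a == 2)) ++ xs.filter (fun a => key a == 3) by
          simp [List.append_assoc]]
      rw [insertBy_append_not before x _ _ ?hskip]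
      case hskip =>
        intro y hy
        rcases List.mem_append.1 hy with hy | hy
        · rcases List.mem_append.1 hy with hy | hy
          · exact hbf y 0 (mem_filter_key key xs 0 y hy) (by omega)
          · exact hbf y 1 (mem_filter_key key xs 1 y hy) (by omega)
        · exact hbf y 2 (mem_filter_key key xs 2 y hy) (by omega)
      rw [insertBy_all_before before x _
            (fun y hy => hbt y 3 (mem_filter_key key xs 3 y hy) (by omega))]
      simp [hx, List.append_assoc]
    · rw [PySem.List.insertBy_of_forall_not_before before x _ ?_]
      · simp [hx, List.append_assoc]
      · intro y hy
        rcases List.mem_append.1 hy with hy | hy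
        · rcases List.mem_append.1 hy with hy | hy
          · rcases List.mem_append.1 hy with hy | hy
            · exact hbf y 0 (mem_filter_key key xs 0 y hy) (by omega)
            · exact hbf y 1 (mem_filter_key key xs 1 y hy) (by omega)
          · exact hbf y 2 (mem_filter_key key xs 2 y hy) (by omega)
        · exact hbf y 3 (mem_filter_key key xs 3 y hy) (by omega)

-- ----- A's reordering characterised as the same buckets -----

theorem filter_key_eq (l : List (String × List String)) (hn : (l.map Prod.fst).Nodup) (L : String) :
    l.filter (fun p => p.1 == L) =
      (match (PySem.Dict.mk l).get? L with
       | some v => [(L, v)]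
       | none => ([] : List (String × List String))) := by
  induction l with
  | nil => simp [PySem.Dict.get?]
  | cons p rest ih =>
    rcases p with ⟨k, v⟩
    simp only [List.map_cons, List.nodup_cons] at hn
    rw [PySem.Dict.get?_mk_cons]
    by_cases hk : k = L
    · subst hk
      simp only [List.filter_cons, beq_self_eq_true, if_pos]
      have : rest.filter (fun p => p.1 == k) = [] := by
        rw [List.filter_eq_nil_iff]
        intro q hq hbeq
        have hm := List.mem_map_of_mem (f := Prod.fst) hq
        rw [beq_iff_eq.mp hbeq] at hm
        exact hn.1 hm
      simp [this]
    · have hbeq : (k == L) = false := by simp [hk]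
      simp only [List.filter_cons, hbeq, Bool.false_eq_true, if_false]
      exact ih hn.2

theorem any_filter_keys_ne (ms : List (String × List String)) (K L : String) (h : K ≠ L) :
    (ms.filter (fun p => p.1 == K)).any (fun p => p.1 == L) = false := by
  rw [List.any_eq_false]
  intro p hp
  have := List.of_mem_filter hp
  simp only [beq_iff_eq] at this ⊢
  rw [this]; exact h

theorem aStep_spec (o : PySem.Dict String (List String)) (l : List (String × List String))
    (L : String) (hn : (l.map Prod.fst).Nodup) (ho : o.contains L = false) :
    (if (PySem.Dict.mk l).contains L then
       match (PySem.Dict.mk l).pop? L with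
       | some (v, m') => (o.insert L v, m')
       | none => (o, PySem.Dict.mk l)
     else (o, PySem.Dict.mk l))
    = (PySem.Dict.mk (o.items ++ l.filter (fun p => p.1 == L)),
       PySem.Dict.mk (l.filter (fun p => !(p.1 == L)))) := by
  cases hg : (PySem.Dict.mk l).get? L with
  | none =>
    have hc : (PySem.Dict.mk l).contains L = false := by
      rw [PySem.Dict.contains_eq_isSome_get?, hg]; rfl
    have hnk : L ∉ l.map Prod.fst := by
      have := (PySem.Dict.get?_eq_none_iff_not_mem_keys (PySem.Dict.mk l) L).mp hg
      simpa [PySem.Dict.keys] using this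
    have h1 : l.filter (fun p => p.1 == L) = [] := by
      rw [List.filter_eq_nil_iff]; intro q hq hbeq
      exact hnk (beq_iff_eq.mp hbeq ▸ List.mem_map_of_mem (f := Prod.fst) hq)
    have h2 : l.filter (fun p => !(p.1 == L)) = l := by
      rw [List.filter_eq_self]; intro q hq
      simp only [Bool.not_eq_eq_eq_not, Bool.not_true, beq_eq_false_iff_ne, ne_eq]
      intro he; exact hnk (he ▸ List.mem_map_of_mem (f := Prod.fst) hq)
    simp [hc, h1, h2]
  | some v =>
    have hc : (PySem.Dict.mk l).contains L = true := by
      rw [PySem.Dict.contains_eq_isSome_get?, hg]; rfl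
    have hpop : (PySem.Dict.mk l).pop? L
        = some (v, PySem.Dict.mk (l.filter (fun p => !(p.1 == L)))) := by
      simp [PySem.Dict.pop?, hg, PySem.Dict.erase]
    have hpick : l.filter (fun p => p.1 == L) = [(L, v)] := by
      rw [filter_key_eq l hn L, hg]
    have hins : (o.insert L v) = PySem.Dict.mk (o.items ++ [(L, v)]) := by
      apply PySem.Dict.ext
      rw [PySem.Dict.items_insert_of_not_contains o v ho]
    simp [hc, hpop, hins, hpick]

theorem nodup_filter_fst {α : Type} (l : List (String × α)) (q : String × α → Bool)
    (hn : (l.map Prod.fst).Nodup) : ((l.filter q).map Prod.fst).Nodup :=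
  ((List.filter_sublist (p := q)).map Prod.fst).nodup hn

theorem A_eq_buckets (d : PySem.Dict String (List String)) (hn : d.keys.Nodup) :
    (let st :=
      promptTierOrder.foldl
        (fun (s : PySem.Dict String (List String) × PySem.Dict String (List String)) label =>
          if s.2.contains label then
            match s.2.pop? label with
            | some (v, m') => (s.1.insert label v, m')
            | none => s
          else s)
        (PySem.Dict.empty, d)
     (st.2.items.foldl (fun o (p : String × List String) => o.insert p.1 p.2) st.1).items)
    = d.items.filter (fun p => p.1 == "Correct")
      ++ d.items.filter (fun p => p.1 == "Partially Correct")
      ++ d.items.filter (fun p => p.1 == "Incorrect")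
      ++ d.items.filter (fun p => !(p.1 == "Correct") && !(p.1 == "Partially Correct") && !(p.1 == "Incorrect")) := by
  obtain ⟨l⟩ := d
  have hn' : (l.map Prod.fst).Nodup := by simpa [PySem.Dict.keys] using hn
  simp only [promptTierOrder, List.foldl_cons, List.foldl_nil]
  rw [show (PySem.Dict.empty : PySem.Dict String (List String)) = PySem.Dict.mk [] from rfl]
  rw [aStep_spec (PySem.Dict.mk []) l "Correct" hn' (by simp [PySem.Dict.contains_mk])]
  rw [aStep_spec _ _ "Partially Correct"
        (nodup_filter_fst l _ hn')
        (by simp [PySem.Dict.contains_mk,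
              any_filter_keys_ne l _ _ (by decide : ("Correct" : String) ≠ "Partially Correct")])]
  rw [aStep_spec _ _ "Incorrect"
        (by rw [List.filter_filter]; exact nodup_filter_fst l _ hn')
        ?hoI]
  case hoI =>
    simp only [PySem.Dict.contains_mk, List.any_append]
    rw [any_filter_keys_ne l _ _ (by decide : ("Correct" : String) ≠ "Incorrect")]
    rw [List.filter_filter]
    simp
    intro a b _ h _
    subst h; decide
  simp only [List.nil_append, List.filter_filter]
  have e1 : (List.filter (fun p => p.1 == "Partially Correct" && !p.1 == "Correct") l)
      = List.filter (fun p => p.1 == "Partially Correct") l := by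
    apply List.filter_congr
    intro p _
    by_cases h : p.1 = "Partially Correct" <;> simp [h]
  have e2 : (List.filter (fun p => p.1 == "Incorrect" && (!p.1 == "Partially Correct" && !p.1 == "Correct")) l)
      = List.filter (fun p => p.1 == "Incorrect") l := by
    apply List.filter_congr
    intro p _
    by_cases h : p.1 = "Incorrect" <;> simp [h]
  have e3 : (List.filter (fun p => !p.1 == "Incorrect" && (!p.1 == "Partially Correct" && !p.1 == "Correct")) l)
      = List.filter (fun p => !(p.1 == "Correct") && !(p.1 == "Partially Correct") && !(p.1 == "Incorrect")) l := by
    apply List.filter_congr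
    intro p _
    cases h1 : (p.1 == "Correct") <;> cases h2 : (p.1 == "Partially Correct") <;>
      cases h3 : (p.1 == "Incorrect") <;> rfl
  rw [e1, e2, e3]
  have hfresh : ∀ a ∈ List.filter (fun p => !(p.1 == "Correct") && !(p.1 == "Partially Correct") && !(p.1 == "Incorrect")) l,
      (PySem.Dict.mk (List.filter (fun p => p.1 == "Correct") l
        ++ List.filter (fun p => p.1 == "Partially Correct") l
        ++ List.filter (fun p => p.1 == "Incorrect") l)).contains a.1 = false := by
    intro a ha
    have hm := List.of_mem_filter ha
    simp only [Bool.and_eq_true, Bool.not_eq_eq_eq_not, Bool.not_true, beq_eq_false_iff_ne,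
      ne_eq] at hm
    rw [PySem.Dict.contains_mk]
    simp only [List.any_append, Bool.or_eq_false_iff]
    refine ⟨⟨?_, ?_⟩, ?_⟩ <;>
      · rw [List.any_eq_false]
        intro q hq
        have hx := List.of_mem_filter hq
        simp only [beq_iff_eq] at hx
        rw [hx]
        simp only [ne_eq]
        intro h
        simp only [beq_iff_eq] at h
        rw [← h] at hm
        simp at hm
  have hnod : ((List.filter (fun p => !(p.1 == "Correct") && !(p.1 == "Partially Correct") && !(p.1 == "Incorrect")) l).map Prod.fst).Nodup :=
    nodup_filter_fst l _ hn'
  rw [PySem.Dict.items_foldl_insert_fresh _ Prod.fst Prod.snd _ hfresh hnod]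
  simp [List.append_assoc]

-- ----- the grouping fold keeps merged's keys without duplicates -----

theorem group_nodup (gs : List (String × List String)) (m : PySem.Dict String (List String))
    (hm : m.keys.Nodup) :
    ((gs.foldl
      (fun m p =>
        if p.2.isEmpty then m
        else m.insert (promptTierLabel p.1) (m.getD (promptTierLabel p.1) [] ++ p.2))
      m).keys).Nodup := by
  induction gs generalizing m with
  | nil => exact hm
  | cons p rest ih =>
    simp only [List.foldl_cons]
    by_cases he : p.2.isEmpty
    · simp only [he, if_pos]; exact ih _ hm
    · simp only [he, Bool.false_eq_true, if_false]
      exact ih _ (PySem.Dict.nodup_keys_insert _ _ _ hm)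

-- dict(pairs) on a duplicate-free key list keeps the list as-is
theorem items_ofList_nodup {ν : Type} (L : List (String × ν)) (h : (L.map Prod.fst).Nodup) :
    (PySem.Dict.ofList L).items = L := by
  show (List.foldl (fun d p => d.insert p.1 p.2) PySem.Dict.empty L).items = L
  have := PySem.Dict.items_foldl_insert_fresh L Prod.fst Prod.snd PySem.Dict.empty
    (by intro a _; simp [PySem.Dict.contains_empty]) h
  simpa [PySem.Dict.empty] using this

-- ----- B's sorted output characterised as the same buckets -----

theorem B_eq_buckets (d : PySem.Dict String (List String)) (hn : d.keys.Nodup) :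
    (PySem.Dict.ofList
      (PySem.List.sorted d.items (fun kv : String × List String =>
        (PySem.Dict.ofList ((PySem.List.enumerate promptTierOrder).map (fun p => (p.2, p.1)))
          : PySem.Dict String Int).getD kv.1
          ((PySem.Dict.size (PySem.Dict.ofList ((PySem.List.enumerate promptTierOrder).map (fun p => (p.2, p.1))) : PySem.Dict String Int) : Nat) : Int)))).items
    = d.items.filter (fun p => p.1 == "Correct")
      ++ d.items.filter (fun p => p.1 == "Partially Correct")
      ++ d.items.filter (fun p => p.1 == "Incorrect")
      ++ d.items.filter (fun p => !(p.1 == "Correct") && !(p.1 == "Partially Correct") && !(p.1 == "Incorrect")) := by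
  rw [key_eq_rankF]
  have hperm := PySem.List.sorted_perm d.items (fun kv : String × List String => rankF kv.1) false
  have hsortnd : ((PySem.List.sorted d.items (fun kv : String × List String => rankF kv.1)).map
      Prod.fst).Nodup :=
    ((hperm.map Prod.fst).nodup_iff).mpr (by simpa [PySem.Dict.keys] using hn)
  rw [items_ofList_nodup _ hsortnd]
  rw [sorted4 _ _ (fun x _ => rankF_cases x.1)]
  simp only [rank0, rank1, rank2, rank3]

-- ===== VERDICT (by name: the statement is the Claim_ definition above) =====
theorem group_prompt_solutions_py_spec : Claim_equal_group_prompt_solutions_py := by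
  intro gs _
  unfold Spec_group_prompt_solutions_py
  have hnd : ((gs.foldl
      (fun m p =>
        if p.2.isEmpty then m
        else m.insert (promptTierLabel p.1) (m.getD (promptTierLabel p.1) [] ++ p.2))
      PySem.Dict.empty).keys).Nodup :=
    group_nodup gs PySem.Dict.empty (by simp [PySem.Dict.empty, PySem.Dict.keys])
  have h1 : group_prompt_solutions_py gs = _ := A_eq_buckets _ hnd
  have h2 : group_prompt_solutions_py_alt gs = _ := B_eq_buckets _ hnd
  exact h1.trans h2.symm
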